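-- pv_equiv track=rewrite | github.com/smenon8/TwitterSentimentsClassification | script/TwitterSentiments.py | genVocab
-- ===== SOURCE A (Python) =====
-- from collections import Counter, OrderedDict
--
-- def genVocab(dictFile,header='Anootated tweet'):
--     allFtrs = []
--     for row in dictFile:
--         allFtrs.extend(row[header])
--
--     allFtrCnt = Counter(allFtrs)
--     cntSorted = OrderedDict()
--
--     attribs = sorted(allFtrCnt.keys(), key = lambda x : allFtrCnt[x], reverse=True)
--     for attrib in attribs:
--         if attrib != 'class':
--             cntSorted[attrib] = allFtrCnt[attrib]
--
--     return list(cntSorted.keys())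
-- ===== SOURCE B (Python) =====
-- def genVocab(dictFile, header='Anootated tweet'):
--     counts = {}
--     for row in dictFile:
--         for ftr in row[header]:
--             counts[ftr] = counts.get(ftr, 0) + 1
--     buckets = {}
--     for ftr, c in counts.items():
--         buckets.setdefault(c, []).append(ftr)
--     out = []
--     for c in sorted(buckets, reverse=True):
--         out.extend(f for f in buckets[c] if f != 'class')
--     return out
-- ===== Notes on version B (the rewrite author's own statement) =====
-- stated objective: alternative
-- what changed: Replaces the stable comparison sort of all distinct features by their counts with a frequency-bucket pass: features are grouped by count in first-appearance order and only the distinct count values are sorted descending, then buckets are emitted in that order (skipping 'class').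
import Mathlib
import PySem

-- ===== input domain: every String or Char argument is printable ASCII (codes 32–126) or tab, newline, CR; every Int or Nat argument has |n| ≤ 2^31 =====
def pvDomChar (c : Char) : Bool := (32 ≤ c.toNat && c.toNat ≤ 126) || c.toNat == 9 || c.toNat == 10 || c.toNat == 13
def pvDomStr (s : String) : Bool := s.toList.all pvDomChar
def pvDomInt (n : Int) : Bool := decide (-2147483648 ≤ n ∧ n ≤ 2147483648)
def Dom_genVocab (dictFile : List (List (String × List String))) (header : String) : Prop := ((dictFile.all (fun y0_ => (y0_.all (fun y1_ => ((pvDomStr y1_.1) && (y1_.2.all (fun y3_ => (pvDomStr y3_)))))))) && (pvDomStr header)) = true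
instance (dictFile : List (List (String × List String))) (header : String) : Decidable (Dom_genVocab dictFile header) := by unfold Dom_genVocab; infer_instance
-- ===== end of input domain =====

-- B replaces the stable sort of all features by count with a frequency-bucket pass (only the
-- distinct count values are sorted); equivalence of the RETURN values is proved on Pre_ below.

-- ===== PORT A =====
def genVocab (dictFile : List (List (String × List String))) (header : String) : List String :=
  let allFtrs : List String :=
    dictFile.foldl (fun acc row => acc ++ ((PySem.Dict.mk row).get? header).getD []) []
  let allFtrCnt : PySem.Dict String Int := PySem.Dict.counter allFtrs
  let attribs : List String :=
    PySem.List.sorted allFtrCnt.keys (fun x => allFtrCnt.getD x 0) true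
  let cntSorted : PySem.Dict String Int :=
    attribs.foldl
      (fun d attrib => if attrib != "class" then d.insert attrib (allFtrCnt.getD attrib 0) else d)
      PySem.Dict.empty
  cntSorted.keys

-- ===== PORT B =====
def genVocab_alt (dictFile : List (List (String × List String))) (header : String) : List String :=
  let counts : PySem.Dict String Int :=
    dictFile.foldl
      (fun d row =>
        (((PySem.Dict.mk row).get? header).getD []).foldl
          (fun d ftr => d.insert ftr (d.getD ftr 0 + 1)) d)
      PySem.Dict.empty
  let buckets : PySem.Dict Int (List String) :=
    counts.items.foldl (fun b p => b.modify p.2 [] (fun l => l ++ [p.1])) PySem.Dict.empty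
  (PySem.List.sorted buckets.keys (fun c => c) true).foldl
    (fun out c => out ++ (buckets.getD c []).filter (fun f => f != "class")) []

-- ===== PRECONDITION & SPEC =====
-- Pre_ excludes exactly the inputs where some row lacks the header key: there Python A raises KeyError.
def Pre_genVocab (dictFile : List (List (String × List String))) (header : String) : Prop :=
  ∀ row ∈ dictFile, (PySem.Dict.mk row).contains header = true
instance (dictFile : List (List (String × List String))) (header : String) : Decidable (Pre_genVocab dictFile header) := by unfold Pre_genVocab; infer_instance
def pvWitness_genVocab : (List (List (String × List String))) × String :=
  ([[("h", ["a", "b", "a", "class"])], [("h", ["b", "a", "c"])]], "h")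

def Spec_genVocab (dictFile : List (List (String × List String))) (header : String) (out : List String) : Prop := out = genVocab_alt dictFile header
instance (dictFile : List (List (String × List String))) (header : String) (out : List String) : Decidable (Spec_genVocab dictFile header out) := by unfold Spec_genVocab; infer_instance

-- ===== CLAIM (what is proved, stated in full; the proofs are below) =====
def Claim_equal_genVocab : Prop := ∀ (dictFile : List (List (String × List String))) (header : String), Dom_genVocab dictFile header → Pre_genVocab dictFile header → Spec_genVocab dictFile header (genVocab dictFile header)

-- ===== LEMMAS AND PROOFS =====

-- insertBy passes over a block of elements it does not go before
theorem insertBy_append_of_not_before {α : Type} (before : α → α → Bool) (x : α) :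
    ∀ (l l2 : List α), (∀ y ∈ l, before x y = false) →
      PySem.List.insertBy before x (l ++ l2) = l ++ PySem.List.insertBy before x l2 := by
  intro l l2 h
  induction l with
  | nil => simp
  | cons y ys ih =>
    have hy := h y (by simp)
    simp [PySem.List.insertBy, hy, ih (fun z hz => h z (by simp [hz]))]

-- insertBy puts x in front when it goes before everything
theorem insertBy_eq_cons_of_forall_before {α : Type} (before : α → α → Bool) (x : α)
    (l : List α) (h : ∀ y ∈ l, before x y = true) :
    PySem.List.insertBy before x l = x :: l := by
  cases l with
  | nil => simp [PySem.List.insertBy]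
  | cons y ys => simp [PySem.List.insertBy, h y (by simp)]

theorem pv_flatMap_congr {α β : Type} {l : List α} {f g : α → List β}
    (h : ∀ x ∈ l, f x = g x) : l.flatMap f = l.flatMap g := by
  induction l with
  | nil => rfl
  | cons a t ih =>
    rw [List.flatMap_cons, List.flatMap_cons, h a (List.mem_cons_self ..),
      ih (fun x hx => h x (List.mem_cons_of_mem _ hx))]

-- L2: f x is an existing bucket key: inserting x appends it to its bucket
theorem insertBy_flatMap_mem (f : String → Int) (x : String) (K : List String) :
    ∀ (cs : List Int), cs.Pairwise (fun a b => b < a) → f x ∈ cs →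
      PySem.List.insertBy (fun a b => decide (f b < f a)) x
          (cs.flatMap (fun c => K.filter (fun y => f y == c)))
        = cs.flatMap (fun c => (K ++ [x]).filter (fun y => f y == c)) := by
  intro cs hgt hmem
  induction cs with
  | nil => simp at hmem
  | cons c t ih =>
    have hpair : ∀ b ∈ t, b < c := (List.pairwise_cons.mp hgt).1
    rw [List.flatMap_cons, List.flatMap_cons]
    by_cases hc : c = f x
    · subst hc
      have hfxt : f x ∉ t := fun h => lt_irrefl _ (hpair _ h)
      have htail : t.flatMap (fun c => (K ++ [x]).filter (fun y => f y == c))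
          = t.flatMap (fun c => K.filter (fun y => f y == c)) :=
        pv_flatMap_congr (fun c' hc' => by
          have : f x ≠ c' := fun he => hfxt (he ▸ hc')
          simp [List.filter_append, this])
      rw [htail]
      rw [insertBy_append_of_not_before _ _ _ _ (fun y hy => by
        have : f y = f x := by simpa using (List.mem_filter.mp hy).2
        simp [this])]
      rw [insertBy_eq_cons_of_forall_before _ _ _ (fun y hy => by
        rcases List.mem_flatMap.mp hy with ⟨c', hc', hy'⟩
        have h1 : f y = c' := by simpa using (List.mem_filter.mp hy').2
        have h2 : c' < f x := hpair _ hc'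
        simp [h1, h2])]
      simp [List.filter_append]
    · have hmt : f x ∈ t := by
        rcases List.mem_cons.mp hmem with h | h
        · exact absurd h.symm hc
        · exact h
      have hlt : f x < c := hpair _ hmt
      have hhead : (K ++ [x]).filter (fun y => f y == c) = K.filter (fun y => f y == c) := by
        have : f x ≠ c := ne_of_lt hlt
        simp [List.filter_append, this]
      rw [hhead]
      rw [insertBy_append_of_not_before _ _ _ _ (fun y hy => by
        have : f y = c := by simpa using (List.mem_filter.mp hy).2
        simp [this, not_lt.mpr (le_of_lt hlt)])]
      rw [ih (List.pairwise_cons.mp hgt).2 hmt]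

-- L1: f x is a new count value: a new singleton bucket appears at its sorted position
theorem insertBy_flatMap_not_mem (f : String → Int) (x : String) (K : List String)
    (hK : ∀ y ∈ K, f y ≠ f x) :
    ∀ (cs : List Int), cs.Pairwise (fun a b => b < a) → f x ∉ cs →
      PySem.List.insertBy (fun a b => decide (f b < f a)) x
          (cs.flatMap (fun c => K.filter (fun y => f y == c)))
        = (PySem.List.insertBy (fun a b => decide (b < a)) (f x) cs).flatMap
            (fun c => (K ++ [x]).filter (fun y => f y == c)) := by
  intro cs hgt hnm
  induction cs with
  | nil =>
    have hKf : K.filter (fun y => f y == f x) = [] :=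
      List.filter_eq_nil_iff.mpr (fun y hy => by simp [hK y hy])
    simp [PySem.List.insertBy, List.filter_append, hKf]
  | cons c t ih =>
    have hpair : ∀ b ∈ t, b < c := (List.pairwise_cons.mp hgt).1
    have hcne : c ≠ f x := fun h => hnm (h ▸ List.mem_cons_self ..)
    by_cases hc : c < f x
    · have hins : PySem.List.insertBy (fun a b => decide (b < a)) (f x) (c :: t)
          = f x :: c :: t := by simp [PySem.List.insertBy, hc]
      have hKf : K.filter (fun y => f y == f x) = [] :=
        List.filter_eq_nil_iff.mpr (fun y hy => by simp [hK y hy])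
      have hfx : (K ++ [x]).filter (fun y => f y == f x) = [x] := by
        simp [List.filter_append, hKf]
      have htail : (c :: t).flatMap (fun c => (K ++ [x]).filter (fun y => f y == c))
          = (c :: t).flatMap (fun c => K.filter (fun y => f y == c)) :=
        pv_flatMap_congr (fun c' hc' => by
          have : f x ≠ c' := fun he => hnm (he ▸ hc')
          simp [List.filter_append, this])
      have hall : ∀ y ∈ (c :: t).flatMap (fun c => K.filter (fun y => f y == c)),
          (fun a b => decide (f b < f a)) x y = true := by
        intro y hy
        rcases List.mem_flatMap.mp hy with ⟨c', hc', hy'⟩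
        have h1 : f y = c' := by simpa using (List.mem_filter.mp hy').2
        have h2 : c' < f x := by
          rcases List.mem_cons.mp hc' with h | h
          · exact h ▸ hc
          · exact lt_trans (hpair _ h) hc
        simp [h1, h2]
      calc PySem.List.insertBy (fun a b => decide (f b < f a)) x
              ((c :: t).flatMap (fun c => K.filter (fun y => f y == c)))
          = x :: (c :: t).flatMap (fun c => K.filter (fun y => f y == c)) :=
            insertBy_eq_cons_of_forall_before _ _ _ hall
        _ = (f x :: c :: t).flatMap (fun c => (K ++ [x]).filter (fun y => f y == c)) := by
            rw [List.flatMap_cons (xs := c :: t), hfx, htail]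
            rfl
        _ = _ := by rw [hins]
    · have hfxc : f x < c := lt_of_le_of_ne (not_lt.mp hc) (Ne.symm hcne)
      have hins : PySem.List.insertBy (fun a b => decide (b < a)) (f x) (c :: t)
          = c :: PySem.List.insertBy (fun a b => decide (b < a)) (f x) t := by
        simp [PySem.List.insertBy, not_lt.mpr (le_of_lt hfxc)]
      rw [hins, List.flatMap_cons, List.flatMap_cons]
      have hhead : (K ++ [x]).filter (fun y => f y == c) = K.filter (fun y => f y == c) := by
        simp [List.filter_append, Ne.symm hcne]
      rw [hhead]
      rw [insertBy_append_of_not_before _ _ _ _ (fun y hy => by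
        have : f y = c := by simpa using (List.mem_filter.mp hy).2
        simp [this, not_lt.mpr (le_of_lt hfxc)])]
      rw [ih (List.pairwise_cons.mp hgt).2 (fun h => hnm (List.mem_cons_of_mem _ h))]

-- the descending sorted list of a Set is strictly decreasing
theorem sorted_ofList_pairwise_gt (xs : List Int) :
    (PySem.List.sorted (PySem.Set.ofList xs) (fun c => c) true).Pairwise (fun a b => b < a) := by
  have h1 := PySem.List.sorted_pairwise_rev (PySem.Set.ofList xs) (fun c => c)
  have h2 : (PySem.List.sorted (PySem.Set.ofList xs) (fun c => c) true).Nodup :=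
    (PySem.List.sorted_perm (PySem.Set.ofList xs) (fun c => c) true).symm.nodup
      (PySem.Set.nodup_ofList xs)
  exact (h1.and h2).imp (fun hp => lt_of_le_of_ne hp.1 (fun he => hp.2 he.symm))

-- CORE: a stable descending sort by key equals the concatenation of the first-appearance
-- buckets, taken over the distinct key values in descending order.
theorem stable_rev_sort_eq_buckets (f : String → Int) (K : List String) :
    PySem.List.sorted K f true
      = (PySem.List.sorted (PySem.Set.ofList (K.map f)) (fun c => c) true).flatMap
          (fun c => K.filter (fun y => f y == c)) := by
  induction K using List.reverseRecOn with
  | nil => simp [PySem.List.sorted, PySem.Set.ofList]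
  | append_singleton K x ih =>
    rw [PySem.List.sorted_rev_eq_foldl_insertBy (K ++ [x]) f, List.foldl_append]
    simp only [List.foldl_cons, List.foldl_nil]
    rw [← PySem.List.sorted_rev_eq_foldl_insertBy K f, ih]
    have hmapf : (K ++ [x]).map f = K.map f ++ [f x] := by simp
    rw [hmapf, PySem.Set.ofList_append_singleton]
    by_cases hm : f x ∈ K.map f
    · rw [PySem.Set.add_of_mem ((PySem.Set.mem_ofList _ _).mpr hm)]
      exact insertBy_flatMap_mem f x K _ (sorted_ofList_pairwise_gt _)
        ((PySem.List.mem_sorted _ _ _ _).mpr ((PySem.Set.mem_ofList _ _).mpr hm))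
    · rw [PySem.Set.add_of_not_mem (fun h => hm ((PySem.Set.mem_ofList _ _).mp h))]
      have hsplit : PySem.List.sorted (PySem.Set.ofList (K.map f) ++ [f x]) (fun c => c) true
          = PySem.List.insertBy (fun a b => decide (b < a)) (f x)
              (PySem.List.sorted (PySem.Set.ofList (K.map f)) (fun c => c) true) := by
        rw [PySem.List.sorted_rev_eq_foldl_insertBy, List.foldl_append,
          ← PySem.List.sorted_rev_eq_foldl_insertBy]
        simp
      rw [hsplit]
      exact insertBy_flatMap_not_mem f x K
        (fun y hy he => hm (he ▸ List.mem_map_of_mem hy)) _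
        (sorted_ofList_pairwise_gt _)
        (fun h => hm ((PySem.Set.mem_ofList _ _).mp ((PySem.List.mem_sorted _ _ _ _).mp h)))

theorem pv_filter_flatMap {α β : Type} (l : List α) (g : α → List β) (p : β → Bool) :
    (l.flatMap g).filter p = l.flatMap (fun c => (g c).filter p) := by
  induction l with
  | nil => rfl
  | cons a t ih => simp [List.flatMap_cons, List.filter_append, ih]

-- A's guarded loop = fold over the filtered list
theorem foldl_insert_if_eq_filter (v : String → Int) :
    ∀ (l : List String) (d : PySem.Dict String Int),
      l.foldl (fun d a => if a != "class" then d.insert a (v a) else d) d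
        = (l.filter (fun a => a != "class")).foldl (fun d a => d.insert a (v a)) d := by
  intro l
  induction l with
  | nil => intro d; rfl
  | cons a t ih =>
    intro d
    cases h : (a != "class")
    · simp only [List.foldl_cons, List.filter_cons, h, Bool.false_eq_true, if_false]
      exact ih d
    · simp only [List.foldl_cons, List.filter_cons, h, if_true]
      exact ih _

-- A's guarded OrderedDict-building loop = filter
theorem foldl_insert_if_keys (v : String → Int) (l : List String) (hnd : l.Nodup) :
    (l.foldl (fun d a => if a != "class" then d.insert a (v a) else d)
        (PySem.Dict.empty : PySem.Dict String Int)).keys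
      = l.filter (fun a => a != "class") := by
  rw [foldl_insert_if_eq_filter, PySem.Dict.keys_foldl_insert, PySem.Dict.keys_empty,
    PySem.Set.update_nil_left]
  exact PySem.Set.ofList_eq_self_of_nodup _ (hnd.filter _)

-- fold over a flattened list = nested fold
theorem pv_foldl_flatMap {α β σ : Type} (g : α → List β) (step : σ → β → σ) :
    ∀ (l : List α) (init : σ),
      (l.flatMap g).foldl step init = l.foldl (fun s row => (g row).foldl step s) init := by
  intro l
  induction l with
  | nil => intro init; rfl
  | cons a t ih => intro init; simp [List.flatMap_cons, List.foldl_append, ih]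

-- B's bucket dict: lookup of a count value gives that bucket, in first-appearance order
theorem pv_buckets_getD :
    ∀ (ps : List (String × Int)) (b : PySem.Dict Int (List String)) (c : Int),
      (ps.foldl (fun b p => b.modify p.2 [] (fun l => l ++ [p.1])) b).getD c []
        = b.getD c [] ++ (ps.filter (fun p => p.2 == c)).map (fun p => p.1) := by
  intro ps
  induction ps with
  | nil => intro b c; simp
  | cons p t ih =>
    intro b c
    simp only [List.foldl_cons, List.filter_cons]
    rw [ih]
    by_cases h : c = p.2
    · simp [h]
    · have h' : (p.2 == c) = false := beq_eq_false_iff_ne.mpr (fun he => h he.symm)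
      simp [PySem.Dict.getD_modify, h, h']

-- B's bucket dict: its keys are the distinct count values in first-appearance order
theorem pv_buckets_keys (ps : List (String × Int)) (b : PySem.Dict Int (List String)) :
    (ps.foldl (fun b p => b.modify p.2 [] (fun l => l ++ [p.1])) b).keys
      = PySem.Set.update b.keys (ps.map (fun p => p.2)) :=
  PySem.Dict.keys_foldl_modify_key ps (fun p => p.2) [] (fun _ p l => l ++ [p.1]) b

-- B's nested counting loop = Counter of the flattened features
theorem counts_eq_counter (dictFile : List (List (String × List String))) (header : String) :
    dictFile.foldl
        (fun d row =>
          (((PySem.Dict.mk row).get? header).getD []).foldl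
            (fun d ftr => d.insert ftr (d.getD ftr 0 + 1)) d)
        PySem.Dict.empty
      = PySem.Dict.counter
          (dictFile.foldl (fun acc row => acc ++ ((PySem.Dict.mk row).get? header).getD []) []) := by
  rw [PySem.List.foldl_append_eq_flatMap, List.nil_append,
    ← PySem.Dict.foldl_insert_getD_add_one_eq_counter, pv_foldl_flatMap]

-- canonical form of port A
theorem genVocab_eq (dictFile : List (List (String × List String))) (header : String) :
    genVocab dictFile header
      = (PySem.List.sorted
            (PySem.Set.ofList
              (dictFile.foldl (fun acc row => acc ++ ((PySem.Dict.mk row).get? header).getD []) []))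
            (fun k => ((dictFile.foldl (fun acc row => acc ++ ((PySem.Dict.mk row).get? header).getD []) []).count k : Int))
            true).filter (fun a => a != "class") := by
  have h1 : genVocab dictFile header
      = ((PySem.List.sorted
            (PySem.Dict.counter (dictFile.foldl (fun acc row => acc ++ ((PySem.Dict.mk row).get? header).getD []) [])).keys
            (fun x => (PySem.Dict.counter (dictFile.foldl (fun acc row => acc ++ ((PySem.Dict.mk row).get? header).getD []) [])).getD x 0)
            true).foldl
          (fun d attrib =>
            if attrib != "class" then
              d.insert attrib ((PySem.Dict.counter (dictFile.foldl (fun acc row => acc ++ ((PySem.Dict.mk row).get? header).getD []) [])).getD attrib 0)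
            else d)
          PySem.Dict.empty).keys := rfl
  rw [h1]
  rw [foldl_insert_if_keys _ _
    ((PySem.List.sorted_perm _ _ _).symm.nodup (PySem.Dict.nodup_keys_counter _))]
  rw [PySem.Dict.keys_counter]
  congr 1
  apply congrFun
  apply congrArg
  funext x
  exact PySem.Dict.getD_counter _ _

-- canonical form of port B
theorem genVocab_alt_eq (dictFile : List (List (String × List String))) (header : String) :
    genVocab_alt dictFile header
      = ((PySem.List.sorted
            (PySem.Set.ofList
              ((PySem.Set.ofList (dictFile.foldl (fun acc row => acc ++ ((PySem.Dict.mk row).get? header).getD []) []) : List String).map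
                (fun k => ((dictFile.foldl (fun acc row => acc ++ ((PySem.Dict.mk row).get? header).getD []) []).count k : Int))))
            (fun c => c) true).flatMap
          (fun c =>
            (PySem.Set.ofList (dictFile.foldl (fun acc row => acc ++ ((PySem.Dict.mk row).get? header).getD []) []) : List String).filter
              (fun y => ((dictFile.foldl (fun acc row => acc ++ ((PySem.Dict.mk row).get? header).getD []) []).count y : Int) == c))).filter
          (fun a => a != "class") := by
  have h1 : genVocab_alt dictFile header
      = List.foldl
          (fun out c =>
            out ++
              (((dictFile.foldl
                    (fun d row =>
                      (((PySem.Dict.mk row).get? header).getD []).foldl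
                        (fun d ftr => d.insert ftr (d.getD ftr 0 + 1)) d)
                    (PySem.Dict.empty : PySem.Dict String Int)).items.foldl
                  (fun b p => b.modify p.2 [] (fun l => l ++ [p.1]))
                  (PySem.Dict.empty : PySem.Dict Int (List String))).getD c []).filter
                (fun f => f != "class"))
          []
          (PySem.List.sorted
            ((dictFile.foldl
                  (fun d row =>
                    (((PySem.Dict.mk row).get? header).getD []).foldl
                      (fun d ftr => d.insert ftr (d.getD ftr 0 + 1)) d)
                  (PySem.Dict.empty : PySem.Dict String Int)).items.foldl
                (fun b p => b.modify p.2 [] (fun l => l ++ [p.1]))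
                (PySem.Dict.empty : PySem.Dict Int (List String))).keys
            (fun c => c) true) := rfl
  rw [h1, counts_eq_counter, PySem.Dict.items_counter]
  rw [PySem.List.foldl_append_eq_flatMap, List.nil_append]
  rw [pv_buckets_keys, PySem.Dict.keys_empty, PySem.Set.update_nil_left, List.map_map]
  have hgetD : ∀ c : Int,
      (List.foldl (fun b p => b.modify p.2 [] (fun l => l ++ [p.1]))
          (PySem.Dict.empty : PySem.Dict Int (List String))
          (List.map (fun k => (k, (List.count k (List.foldl (fun acc row => acc ++ ((PySem.Dict.mk row).get? header).getD []) [] dictFile) : Int)))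
            (PySem.Set.ofList (List.foldl (fun acc row => acc ++ ((PySem.Dict.mk row).get? header).getD []) [] dictFile)))).getD c []
        = List.filter (fun y => (List.count y (List.foldl (fun acc row => acc ++ ((PySem.Dict.mk row).get? header).getD []) [] dictFile) : Int) == c)
            (PySem.Set.ofList (List.foldl (fun acc row => acc ++ ((PySem.Dict.mk row).get? header).getD []) [] dictFile)) := by
    intro c
    rw [pv_buckets_getD, PySem.Dict.getD_empty, List.nil_append, List.filter_map, List.map_map]
    simp [Function.comp_def]
  rw [pv_filter_flatMap]
  exact pv_flatMap_congr (fun c _ => by rw [hgetD c])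

-- ports agree
theorem genVocab_agrees (dictFile : List (List (String × List String))) (header : String) :
    genVocab dictFile header = genVocab_alt dictFile header := by
  rw [genVocab_eq, genVocab_alt_eq, stable_rev_sort_eq_buckets]

-- ===== VERDICT (by name: the statement is the Claim_ definition above) =====
theorem genVocab_spec : Claim_equal_genVocab := by
  intro dictFile header _ _
  unfold Spec_genVocab
  exact genVocab_agrees dictFile header
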